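-- pv_equiv track=rewrite | github.com/adityajayashankar/Deplai | terraform_agent/agent/engine/service.py | _deterministic_refine
-- ===== SOURCE A (Python) =====
-- from typing import Any
--
-- def _deterministic_refine(files: dict[str, str], diagnostics: list[dict[str, Any]]) -> dict[str, str]:
--     patched = dict(files)
--     for diagnostic in diagnostics:
--         summary = str(diagnostic.get("summary") or "")
--         detail = str(diagnostic.get("detail") or "")
--         text = f"{summary}\n{detail}".lower()
--         if "unsupported argument" in text:
--             for line in detail.splitlines():
--                 if '"' not in line:
--                     continue
--                 arg = line.split('"')[1]
--                 for path, content in list(patched.items()):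
--                     patched[path] = "\n".join(
--                         existing_line
--                         for existing_line in content.splitlines()
--                         if f"{arg} =" not in existing_line
--                     )
--         if "cycle" in text:
--             for path, content in list(patched.items()):
--                 patched[path] = "\n".join(
--                     existing_line for existing_line in content.splitlines() if "depends_on" not in existing_line
--                 )
--     return patched
-- ===== SOURCE B (Python) =====
-- def _deterministic_refine(files: dict[str, str], diagnostics: list[dict]) -> dict[str, str]:
--     # Gather, in diagnostic order, one "remove every line containing this needle" pass per
--     # offending argument / cycle diagnostic, then apply the passes file by file.
--     needles = []
--     for diagnostic in diagnostics:
--         summary = str(diagnostic.get("summary") or "")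
--         detail = str(diagnostic.get("detail") or "")
--         text = f"{summary}\n{detail}".lower()
--         if "unsupported argument" in text:
--             needles.extend(
--                 line.split('"')[1] + " ="
--                 for line in detail.splitlines()
--                 if '"' in line
--             )
--         if "cycle" in text:
--             needles.append("depends_on")
--
--     def apply_passes(content: str) -> str:
--         for needle in needles:
--             content = "\n".join(line for line in content.splitlines() if needle not in line)
--         return content
--
--     return {path: apply_passes(content) for path, content in files.items()}
-- ===== Notes on version B (the rewrite author's own statement) =====
-- stated objective: simpler
-- what changed: B gathers all removal needles (arg + ' =' strings and 'depends_on') in one pass over the diagnostics and then rewrites each file once via a dict comprehension, instead of A's interleaved loop that re-materializes and rewrites the whole files dict inside the diagnostics/args loops.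
import Mathlib
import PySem

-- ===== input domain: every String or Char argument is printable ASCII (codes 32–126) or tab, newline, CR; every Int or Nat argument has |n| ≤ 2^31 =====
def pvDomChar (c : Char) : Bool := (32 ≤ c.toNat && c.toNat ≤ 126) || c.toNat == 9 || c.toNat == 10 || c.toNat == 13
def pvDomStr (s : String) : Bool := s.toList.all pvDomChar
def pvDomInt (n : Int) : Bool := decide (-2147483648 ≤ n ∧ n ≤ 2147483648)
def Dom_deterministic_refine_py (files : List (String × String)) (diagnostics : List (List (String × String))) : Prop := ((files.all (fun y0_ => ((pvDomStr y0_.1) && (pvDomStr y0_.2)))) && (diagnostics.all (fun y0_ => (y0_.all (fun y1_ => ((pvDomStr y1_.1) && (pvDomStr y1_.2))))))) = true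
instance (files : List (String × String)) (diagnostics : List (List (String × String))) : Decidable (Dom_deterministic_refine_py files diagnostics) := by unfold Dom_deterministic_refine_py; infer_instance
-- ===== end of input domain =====

-- B gathers all removal needles in one pass over the diagnostics and then rewrites each file once,
-- instead of A's interleaved rewriting of the whole dict inside the diagnostics/args loops (objective: simpler).

-- shared helper for the expression `line.split('"')[1]` + " =" occurring in both Pythons
-- (index 1 exists whenever '"' occurs in line, so the getD/pyGetD defaults are never used)
def pvNeedleOf (line : String) : String :=
  PySem.List.pyGetD ((PySem.Str.split? line "\"").getD []) 1 "" ++ " ="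

-- ===== PORT A =====
-- A-side: `patched[path] = "\n".join(l for l in content.splitlines() if needle not in l)` over list(patched.items())
def pyA_strip (needle : String) (patched : PySem.Dict String String) : PySem.Dict String String :=
  patched.items.foldl (fun p pc =>
    p.insert pc.1 (PySem.Str.join "\n"
      ((PySem.Str.splitlines pc.2).filter (fun el => !(PySem.Str.isIn needle el))))) patched

-- A-side: the `for line in detail.splitlines(): …` loop of the "unsupported argument" branch
def pyA_argLoop (detail : String) (patched : PySem.Dict String String) : PySem.Dict String String :=
  (PySem.Str.splitlines detail).foldl (fun patched line =>
    if !(PySem.Str.isIn "\"" line) then patched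
    else pyA_strip (pvNeedleOf line) patched) patched

-- A-side: the body of `for diagnostic in diagnostics:`; `x.get(k) or ""` = getD k "" (None and "" both yield "")
def pyA_diagStep (patched : PySem.Dict String String) (diagnostic : List (String × String)) : PySem.Dict String String :=
  let summary := (PySem.Dict.ofList diagnostic).getD "summary" ""
  let detail := (PySem.Dict.ofList diagnostic).getD "detail" ""
  let text := PySem.Str.lower (summary ++ "\n" ++ detail)
  let patched := if PySem.Str.isIn "unsupported argument" text then pyA_argLoop detail patched else patched
  if PySem.Str.isIn "cycle" text then pyA_strip "depends_on" patched else patched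

def deterministic_refine_py (files : List (String × String)) (diagnostics : List (List (String × String))) : List (String × String) :=
  (diagnostics.foldl pyA_diagStep (PySem.Dict.ofList files)).items

-- ===== PORT B =====
-- B-side: gather the needles contributed by one diagnostic
def pyB_gatherStep (needles : List String) (diagnostic : List (String × String)) : List String :=
  let summary := (PySem.Dict.ofList diagnostic).getD "summary" ""
  let detail := (PySem.Dict.ofList diagnostic).getD "detail" ""
  let text := PySem.Str.lower (summary ++ "\n" ++ detail)
  let needles :=
    if PySem.Str.isIn "unsupported argument" text then
      needles ++ ((PySem.Str.splitlines detail).filter (fun line => PySem.Str.isIn "\"" line)).map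
        (fun line => pvNeedleOf line)
    else needles
  if PySem.Str.isIn "cycle" text then needles ++ ["depends_on"] else needles

-- B-side: apply_passes — one "drop every line containing needle" pass per gathered needle
def pvApplyPasses (needles : List String) (content : String) : String :=
  needles.foldl (fun content needle =>
    PySem.Str.join "\n" ((PySem.Str.splitlines content).filter (fun line => !(PySem.Str.isIn needle line)))) content

def deterministic_refine_py_alt (files : List (String × String)) (diagnostics : List (List (String × String))) : List (String × String) :=
  let needles : List String := diagnostics.foldl pyB_gatherStep []
  (PySem.Dict.ofList files).items.map (fun pc => (pc.1, pvApplyPasses needles pc.2))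

-- ===== PRECONDITION & SPEC =====
def Spec_deterministic_refine_py (files : List (String × String)) (diagnostics : List (List (String × String))) (out : List (String × String)) : Prop := out = deterministic_refine_py_alt files diagnostics
instance (files : List (String × String)) (diagnostics : List (List (String × String))) (out : List (String × String)) : Decidable (Spec_deterministic_refine_py files diagnostics out) := by unfold Spec_deterministic_refine_py; infer_instance

-- ===== CLAIM (what is proved, stated in full; the proofs are below) =====
def Claim_equal_deterministic_refine_py : Prop := ∀ (files : List (String × String)) (diagnostics : List (List (String × String))), Dom_deterministic_refine_py files diagnostics → Spec_deterministic_refine_py files diagnostics (deterministic_refine_py files diagnostics)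

-- ===== LEMMAS AND PROOFS =====

-- one elementary "drop every line containing needle" pass (the common genexp of both Pythons)
def pvPass (needle content : String) : String :=
  PySem.Str.join "\n" ((PySem.Str.splitlines content).filter (fun el => !(PySem.Str.isIn needle el)))

-- the needles contributed by the detail lines of one "unsupported argument" diagnostic
def pvArgNeedles (lines : List String) : List String :=
  (lines.filter (fun line => PySem.Str.isIn "\"" line)).map (fun line => pvNeedleOf line)

theorem pv_keys_eq (d : PySem.Dict String String) : d.keys = d.items.map Prod.fst := by
  simp [PySem.Dict.keys]

theorem pv_lookup_eq_none {l : List (String × String)} {a : String}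
    (h : a ∉ l.map Prod.fst) : l.lookup a = none := by
  induction l with
  | nil => rfl
  | cons p t ih =>
    simp only [List.map_cons, List.mem_cons, not_or] at h
    simp [List.lookup, beq_eq_false_iff_ne.mpr h.1, ih h.2]

theorem pv_lookup_of_mem {l : List (String × String)} (hnd : (l.map Prod.fst).Nodup)
    {k : String} {v : String} (hm : (k, v) ∈ l) : l.lookup k = some v := by
  induction l with
  | nil => cases hm
  | cons p t ih =>
    simp only [List.map_cons, List.nodup_cons] at hnd
    rcases List.mem_cons.mp hm with h | h
    · simp [List.lookup, ← h]
    · have hk : k ≠ p.1 := by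
        intro he; exact hnd.1 (he ▸ (List.mem_map.mpr ⟨(k, v), h, rfl⟩))
      simp [List.lookup, beq_eq_false_iff_ne.mpr hk, ih hnd.2 h]

theorem pv_foldl_insert_items (f : String → String) :
    ∀ (l : List (String × String)) (d : PySem.Dict String String),
      d.keys.Nodup → (l.map Prod.fst).Nodup → (∀ p ∈ l, p.1 ∈ d.keys) →
      (l.foldl (fun p pc => p.insert pc.1 (f pc.2)) d).items
        = d.items.map (fun q => match l.lookup q.1 with
            | some v => (q.1, f v)
            | none => q) := by
  intro l
  induction l with
  | nil => intro d _ _ _; simp [List.lookup]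
  | cons p t ih =>
    intro d hnd hl hmem
    have hcont : d.contains p.1 = true :=
      (PySem.Dict.contains_iff_mem_keys _ _).mpr (hmem p (List.mem_cons_self ..))
    have hkeys : (d.insert p.1 (f p.2)).keys = d.keys :=
      PySem.Dict.keys_insert_of_contains _ _ hcont
    have hitems : (d.insert p.1 (f p.2)).items
        = d.items.map (fun q => if q.1 == p.1 then (p.1, f p.2) else q) :=
      PySem.Dict.items_insert_of_contains _ _ hcont
    simp only [List.map_cons, List.nodup_cons] at hl
    simp only [List.foldl_cons]
    rw [ih (d.insert p.1 (f p.2)) (hkeys ▸ hnd) hl.2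
        (fun q hq => hkeys ▸ hmem q (List.mem_cons_of_mem _ hq))]
    rw [hitems, List.map_map]
    refine List.map_congr_left (fun q _ => ?_)
    by_cases hq1 : q.1 = p.1
    · have hnone : t.lookup p.1 = none := pv_lookup_eq_none hl.1
      simp [Function.comp, List.lookup, hq1, hnone]
    · simp [Function.comp, List.lookup, beq_eq_false_iff_ne.mpr hq1]

theorem pv_strip_items (needle : String) (d : PySem.Dict String String)
    (h : d.keys.Nodup) :
    (pyA_strip needle d).items = d.items.map (fun q => (q.1, pvPass needle q.2)) := by
  show (d.items.foldl (fun p pc => p.insert pc.1 (pvPass needle pc.2)) d).items = _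
  rw [pv_foldl_insert_items (pvPass needle) d.items d h (by rw [← pv_keys_eq]; exact h)
      (fun p hp => PySem.Dict.mem_keys_of_mem_items _ hp)]
  refine List.map_congr_left (fun q hq => ?_)
  have : d.items.lookup q.1 = some q.2 :=
    pv_lookup_of_mem (by rw [← pv_keys_eq]; exact h) (by simpa using hq)
  simp [this]

theorem pv_applyPasses_nil (c : String) : pvApplyPasses [] c = c := rfl

theorem pv_applyPasses_cons (n : String) (ns : List String) (c : String) :
    pvApplyPasses (n :: ns) c = pvApplyPasses ns (pvPass n c) := rfl

theorem pv_applyPasses_append (ns ms : List String) (c : String) :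
    pvApplyPasses (ns ++ ms) c = pvApplyPasses ms (pvApplyPasses ns c) := by
  simp [pvApplyPasses, List.foldl_append]

theorem pv_keys_of_items_map {d e : PySem.Dict String String} {g : String → String}
    (h : e.items = d.items.map (fun q => (q.1, g q.2))) : e.keys = d.keys := by
  rw [pv_keys_eq, pv_keys_eq, h, List.map_map]
  rfl

theorem pv_argLoop_items (lines : List String) :
    ∀ (d : PySem.Dict String String), d.keys.Nodup →
      ((lines.foldl (fun patched line =>
          if !(PySem.Str.isIn "\"" line) then patched
          else pyA_strip (pvNeedleOf line) patched) d).items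
        = d.items.map (fun q => (q.1, pvApplyPasses (pvArgNeedles lines) q.2))) := by
  induction lines with
  | nil => intro d _; simp [pvArgNeedles, pv_applyPasses_nil]
  | cons line rest ih =>
    intro d hnd
    by_cases hq : PySem.Str.isIn "\"" line = true
    · have hstrip := pv_strip_items (pvNeedleOf line) d hnd
      have hkeys := pv_keys_of_items_map hstrip
      simp only [List.foldl_cons, hq, Bool.not_true, Bool.false_eq_true, if_false]
      rw [ih (pyA_strip (pvNeedleOf line) d) (hkeys ▸ hnd), hstrip, List.map_map]
      have hns : pvArgNeedles (line :: rest) = pvNeedleOf line :: pvArgNeedles rest := by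
        simp_all [pvArgNeedles]
      rw [hns]
      refine List.map_congr_left (fun q _ => ?_)
      simp [Function.comp, pv_applyPasses_cons]
    · have hq' : PySem.Str.isIn "\"" line = false := by simpa using hq
      have hns : pvArgNeedles (line :: rest) = pvArgNeedles rest := by
        simp_all [pvArgNeedles]
      simp only [List.foldl_cons, hq', Bool.not_false, if_true]
      rw [ih d hnd, hns]

theorem pv_diagStep_items (d : PySem.Dict String String)
    (diagnostic : List (String × String)) (hnd : d.keys.Nodup) :
    (pyA_diagStep d diagnostic).items
      = d.items.map (fun q => (q.1, pvApplyPasses (pyB_gatherStep [] diagnostic) q.2)) := by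
  unfold pyA_diagStep pyB_gatherStep pyA_argLoop
  by_cases hu : PySem.Str.isIn "unsupported argument"
      (PySem.Str.lower ((PySem.Dict.ofList diagnostic).getD "summary" "" ++ "\n"
        ++ (PySem.Dict.ofList diagnostic).getD "detail" "")) = true <;>
    by_cases hc : PySem.Str.isIn "cycle"
      (PySem.Str.lower ((PySem.Dict.ofList diagnostic).getD "summary" "" ++ "\n"
        ++ (PySem.Dict.ofList diagnostic).getD "detail" "")) = true <;>
    simp only [hu, hc, if_true, if_false, Bool.false_eq_true, List.nil_append]
  · -- unsupported & cycle
    have harg := pv_argLoop_items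
      (PySem.Str.splitlines ((PySem.Dict.ofList diagnostic).getD "detail" "")) d hnd
    have hkeys := pv_keys_of_items_map harg
    rw [pv_strip_items "depends_on" _ (hkeys ▸ hnd), harg, List.map_map]
    refine List.map_congr_left (fun q _ => ?_)
    simp [Function.comp, pv_applyPasses_append, pv_applyPasses_cons, pv_applyPasses_nil,
      pvArgNeedles]
  · -- unsupported only
    have harg := pv_argLoop_items
      (PySem.Str.splitlines ((PySem.Dict.ofList diagnostic).getD "detail" "")) d hnd
    rw [harg]
    refine List.map_congr_left (fun q _ => ?_)
    simp [pvArgNeedles]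
  · -- cycle only
    rw [pv_strip_items "depends_on" d hnd]
    refine List.map_congr_left (fun q _ => ?_)
    simp [pv_applyPasses_cons, pv_applyPasses_nil]
  · -- neither
    simp [pv_applyPasses_nil]

theorem pv_gatherStep_shift (acc : List String) (diagnostic : List (String × String)) :
    pyB_gatherStep acc diagnostic = acc ++ pyB_gatherStep [] diagnostic := by
  simp only [pyB_gatherStep]
  split_ifs <;> simp

theorem pv_gather_shift (ds : List (List (String × String))) :
    ∀ (acc : List String), ds.foldl pyB_gatherStep acc = acc ++ ds.foldl pyB_gatherStep [] := by
  induction ds with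
  | nil => intro acc; simp
  | cons diag rest ih =>
    intro acc
    rw [List.foldl_cons, List.foldl_cons, ih (pyB_gatherStep acc diag),
      ih (pyB_gatherStep [] diag), pv_gatherStep_shift acc diag, List.append_assoc]

set_option maxHeartbeats 1600000 in
theorem pv_main_fold (ds : List (List (String × String))) :
    ∀ (d : PySem.Dict String String), d.keys.Nodup →
      (ds.foldl pyA_diagStep d).items
        = d.items.map (fun q => (q.1, pvApplyPasses (ds.foldl pyB_gatherStep []) q.2)) := by
  induction ds with
  | nil => intro d _; simp [pv_applyPasses_nil]
  | cons diag rest ih =>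
    intro d hnd
    have hstep := pv_diagStep_items d diag hnd
    have hkeys := pv_keys_of_items_map hstep
    rw [List.foldl_cons, ih (pyA_diagStep d diag) (hkeys ▸ hnd), hstep, List.map_map,
      List.foldl_cons, pv_gather_shift rest (pyB_gatherStep [] diag)]
    refine List.map_congr_left (fun q _ => ?_)
    simp [Function.comp, pv_applyPasses_append]

-- ===== VERDICT (by name: the statement is the Claim_ definition above) =====
set_option maxHeartbeats 1600000 in
theorem deterministic_refine_py_spec : Claim_equal_deterministic_refine_py := by
  intro files diagnostics _
  have hnd : (PySem.Dict.ofList files : PySem.Dict String String).keys.Nodup :=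
    PySem.Dict.nodup_keys_ofList files
  have h := pv_main_fold diagnostics (PySem.Dict.ofList files) hnd
  simpa only [Spec_deterministic_refine_py, deterministic_refine_py,
    deterministic_refine_py_alt] using h
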